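-- pv_equiv track=rewrite | github.com/Luna30cf/Yboost-Snake | without-POO/snake.py | selectL
-- ===== SOURCE A (Python) =====
-- def selectL(y):
--     m = 15
--     p = 1
--     line= [y]
--     c = y
--     for i in range(3):
--         y += (m - 2*c)
--         line.append(y)
--         y += (p + 2*c)
--         line.append(y)
--     y += (m - 2*c)
--     line.append(y)
--     return line
-- ===== SOURCE B (Python) =====
-- def selectL(y):
--     # closed form: element i is y + ceil(i/2)*(15-2y) + floor(i/2)*(1+2y)
--     return [y + ((i + 1) // 2) * (15 - 2 * y) + (i // 2) * (1 + 2 * y) for i in range(8)]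
-- ===== Notes on version B (the rewrite author's own statement) =====
-- stated objective: simpler
-- what changed: Replaces the accumulator loop that appends after each alternating step with a single comprehension computing every element independently from a closed-form index formula.
import Mathlib
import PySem

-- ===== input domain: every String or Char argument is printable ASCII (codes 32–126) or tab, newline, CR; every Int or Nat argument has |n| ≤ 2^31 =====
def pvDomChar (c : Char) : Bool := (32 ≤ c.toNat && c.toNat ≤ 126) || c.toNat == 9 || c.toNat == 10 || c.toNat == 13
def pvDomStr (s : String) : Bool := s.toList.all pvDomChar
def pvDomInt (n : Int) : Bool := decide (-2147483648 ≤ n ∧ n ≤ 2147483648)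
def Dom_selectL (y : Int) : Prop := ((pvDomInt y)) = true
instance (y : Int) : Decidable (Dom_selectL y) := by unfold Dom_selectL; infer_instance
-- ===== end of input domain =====

-- B replaces A's accumulator loop by a closed-form per-index formula (objective: simpler).

-- ===== PORT A =====
-- literal port of A: state (y, line); three loop iterations each doing two step-and-append, then a final step-and-append
def selectL (y : Int) : List Int :=
  let m : Int := 15
  let p : Int := 1
  let line : List Int := [y]
  let c : Int := y
  let st := (PySem.List.pyRange 0 3 1).foldl
    (fun (st : Int × List Int) (_ : Int) =>
      let y := st.1 + (m - 2 * c)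
      let line := st.2 ++ [y]
      let y := y + (p + 2 * c)
      let line := line ++ [y]
      (y, line)) (y, line)
  let y := st.1 + (m - 2 * c)
  st.2 ++ [y]

-- ===== PORT B =====
def selectL_alt (y : Int) : List Int :=
  (PySem.List.pyRange 0 8 1).map
    (fun i => y + (PySem.Int.floordiv (i + 1) 2) * (15 - 2 * y) + (PySem.Int.floordiv i 2) * (1 + 2 * y))

-- ===== PRECONDITION & SPEC =====
def Spec_selectL (y : Int) (out : List Int) : Prop := out = selectL_alt y
instance (y : Int) (out : List Int) : Decidable (Spec_selectL y out) := by unfold Spec_selectL; infer_instance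

-- ===== CLAIM (what is proved, stated in full; the proofs are below) =====
def Claim_equal_selectL : Prop := ∀ (y : Int), Dom_selectL y → Spec_selectL y (selectL y)

-- ===== LEMMAS AND PROOFS =====

-- ===== VERDICT (by name: the statement is the Claim_ definition above) =====
theorem selectL_spec : Claim_equal_selectL := by
  intro y _
  unfold Spec_selectL selectL selectL_alt
  simp [PySem.List.pyRange, PySem.Int.floordiv, List.range_succ]
  norm_num
  ring_nf
  simp
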